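-- pv_equiv track=rewrite | github.com/nitishkrgupta/Intelligent_Question_generator | utils.py | bloom_level
-- ===== SOURCE A (Python) =====
-- def bloom_level(sent: str) -> str:
--     s = sent.lower()
--     if any(k in s for k in ["define", "identify", "list"]):
--         return "Remember (Knowledge)"
--     if any(k in s for k in ["explain", "summarize", "describe", "interpret"]):
--         return "Understand (Comprehension)"
--     if any(k in s for k in ["apply", "use", "calculate", "solve", "demonstrate"]):
--         return "Apply (Application)"
--     if any(k in s for k in ["compare", "contrast", "analyze", "impact", "effect", "examine"]):
--         return "Analyze"
--     if any(k in s for k in ["evaluate", "assess", "justify", "argue", "critique"]):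
--         return "Evaluate"
--     if any(k in s for k in ["design", "create", "propose", "develop", "formulate"]):
--         return "Create"
--     return "Understand (Comprehension)"
-- ===== SOURCE B (Python) =====
-- _LEVELS = ["Remember (Knowledge)", "Understand (Comprehension)", "Apply (Application)",
--            "Analyze", "Evaluate", "Create"]
--
-- _KEYWORDS = [("define", 0), ("identify", 0), ("list", 0),
--              ("explain", 1), ("summarize", 1), ("describe", 1), ("interpret", 1),
--              ("apply", 2), ("use", 2), ("calculate", 2), ("solve", 2), ("demonstrate", 2),
--              ("compare", 3), ("contrast", 3), ("analyze", 3), ("impact", 3), ("effect", 3), ("examine", 3),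
--              ("evaluate", 4), ("assess", 4), ("justify", 4), ("argue", 4), ("critique", 4),
--              ("design", 5), ("create", 5), ("propose", 5), ("develop", 5), ("formulate", 5)]
--
--
-- def bloom_level(sent: str) -> str:
--     s = sent.lower()
--     hits = [r for k, r in _KEYWORDS if k in s]
--     return _LEVELS[min(hits)] if hits else "Understand (Comprehension)"
-- ===== Notes on version B (the rewrite author's own statement) =====
-- stated objective: alternative
-- what changed: Replaced the ordered six-branch short-circuit if-cascade with a flat keyword->priority-rank table scanned once, collecting the ranks of all matching keywords and returning the level of the minimum rank (default Understand when no keyword matches).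
import Mathlib
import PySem

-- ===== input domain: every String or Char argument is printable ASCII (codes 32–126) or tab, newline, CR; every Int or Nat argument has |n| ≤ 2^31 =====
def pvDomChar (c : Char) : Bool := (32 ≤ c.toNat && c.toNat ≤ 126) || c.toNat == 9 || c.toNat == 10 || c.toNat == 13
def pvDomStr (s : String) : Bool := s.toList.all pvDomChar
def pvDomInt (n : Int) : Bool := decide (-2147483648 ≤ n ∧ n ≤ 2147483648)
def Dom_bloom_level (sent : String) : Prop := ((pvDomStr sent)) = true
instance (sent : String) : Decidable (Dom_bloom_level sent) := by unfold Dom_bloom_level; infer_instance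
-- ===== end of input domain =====

-- B replaces A's ordered if-cascade by a flat keyword→rank table scanned once, taking the
-- level of the minimum matching rank (objective: alternative decomposition, same cost).


-- ===== PORT A =====
def bloom_level (sent : String) : String :=
  let s := PySem.Str.lower sent
  if (["define", "identify", "list"]).any (fun k => PySem.Str.isIn k s) then
    "Remember (Knowledge)"
  else if (["explain", "summarize", "describe", "interpret"]).any (fun k => PySem.Str.isIn k s) then
    "Understand (Comprehension)"
  else if (["apply", "use", "calculate", "solve", "demonstrate"]).any (fun k => PySem.Str.isIn k s) then
    "Apply (Application)"
  else if (["compare", "contrast", "analyze", "impact", "effect", "examine"]).any (fun k => PySem.Str.isIn k s) then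
    "Analyze"
  else if (["evaluate", "assess", "justify", "argue", "critique"]).any (fun k => PySem.Str.isIn k s) then
    "Evaluate"
  else if (["design", "create", "propose", "develop", "formulate"]).any (fun k => PySem.Str.isIn k s) then
    "Create"
  else
    "Understand (Comprehension)"

-- ===== PORT B =====
def bloomLevels : List String :=
  ["Remember (Knowledge)", "Understand (Comprehension)", "Apply (Application)",
   "Analyze", "Evaluate", "Create"]

def bloomKeywords : List (String × Nat) :=
  [("define", 0), ("identify", 0), ("list", 0),
   ("explain", 1), ("summarize", 1), ("describe", 1), ("interpret", 1),
   ("apply", 2), ("use", 2), ("calculate", 2), ("solve", 2), ("demonstrate", 2),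
   ("compare", 3), ("contrast", 3), ("analyze", 3), ("impact", 3), ("effect", 3), ("examine", 3),
   ("evaluate", 4), ("assess", 4), ("justify", 4), ("argue", 4), ("critique", 4),
   ("design", 5), ("create", 5), ("propose", 5), ("develop", 5), ("formulate", 5)]

def bloom_level_alt (sent : String) : String :=
  let s := PySem.Str.lower sent
  let hits := (bloomKeywords.filter (fun p => PySem.Str.isIn p.1 s)).map Prod.snd
  match hits.min? with
  | some r => bloomLevels.getD r "Understand (Comprehension)"
  | none => "Understand (Comprehension)"

-- ===== PRECONDITION & SPEC =====
def Spec_bloom_level (sent : String) (out : String) : Prop := out = bloom_level_alt sent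
instance (sent : String) (out : String) : Decidable (Spec_bloom_level sent out) := by unfold Spec_bloom_level; infer_instance

-- ===== CLAIM (what is proved, stated in full; the proofs are below) =====
def Claim_equal_bloom_level : Prop := ∀ (sent : String), Dom_bloom_level sent → Spec_bloom_level sent (bloom_level sent)

-- ===== LEMMAS AND PROOFS =====

-- keyword groups in A's order, and the table built from them with increasing ranks
def bloomGroups : List (List String) :=
  [["define", "identify", "list"],
   ["explain", "summarize", "describe", "interpret"],
   ["apply", "use", "calculate", "solve", "demonstrate"],
   ["compare", "contrast", "analyze", "impact", "effect", "examine"],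
   ["evaluate", "assess", "justify", "argue", "critique"],
   ["design", "create", "propose", "develop", "formulate"]]

-- A's cascade with the matching predicate abstracted out
def chainA (p : String → Bool) : String :=
  if (["define", "identify", "list"]).any p then "Remember (Knowledge)"
  else if (["explain", "summarize", "describe", "interpret"]).any p then "Understand (Comprehension)"
  else if (["apply", "use", "calculate", "solve", "demonstrate"]).any p then "Apply (Application)"
  else if (["compare", "contrast", "analyze", "impact", "effect", "examine"]).any p then "Analyze"
  else if (["evaluate", "assess", "justify", "argue", "critique"]).any p then "Evaluate"
  else if (["design", "create", "propose", "develop", "formulate"]).any p then "Create"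
  else "Understand (Comprehension)"

def flatT (n : Nat) : List (List String) → List (String × Nat)
  | [] => []
  | ks :: rest => ks.map (fun k => (k, n)) ++ flatT (n + 1) rest

def firstIdx (p : String → Bool) : List (List String) → Option Nat
  | [] => none
  | ks :: rest => if ks.any p then some 0 else (firstIdx p rest).map (· + 1)

def hitsOf (p : String → Bool) (t : List (String × Nat)) : List Nat :=
  (t.filter (fun q => p q.1)).map Prod.snd

lemma bloomTable_eq : bloomKeywords = flatT 0 bloomGroups := by decide

lemma bloom_eq_chainA (sent : String) :
    bloom_level sent = chainA (fun k => PySem.Str.isIn k (PySem.Str.lower sent)) := rfl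

lemma hitsOf_ge (p : String → Bool) : ∀ (gs : List (List String)) (n : Nat),
    ∀ x ∈ hitsOf p (flatT n gs), n ≤ x := by
  intro gs
  induction gs with
  | nil => intro n x hx; simp [hitsOf, flatT] at hx
  | cons ks rest ih =>
    intro n x hx
    simp only [hitsOf, flatT, List.filter_append, List.map_append, List.mem_append] at hx
    rcases hx with hx | hx
    · simp only [List.filter_map, List.map_map, List.mem_map] at hx
      obtain ⟨k, -, rfl⟩ := hx
      simp
    · exact Nat.le_of_succ_le (ih (n + 1) x hx)

lemma hitsOf_split (p : String → Bool) (ks : List String) (rest : List (List String)) (n : Nat) :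
    hitsOf p (flatT n (ks :: rest))
      = (ks.filter p).map (fun _ => n) ++ hitsOf p (flatT (n + 1) rest) := by
  simp only [hitsOf, flatT, List.filter_append, List.map_append, List.filter_map, List.map_map]
  rfl

lemma min?_hits (p : String → Bool) : ∀ (gs : List (List String)) (n : Nat),
    (hitsOf p (flatT n gs)).min? = (firstIdx p gs).map (· + n) := by
  intro gs
  induction gs with
  | nil => intro n; simp [hitsOf, flatT, firstIdx]
  | cons ks rest ih =>
    intro n
    rw [hitsOf_split]
    by_cases h : ks.any p = true
    · obtain ⟨k, hk, hpk⟩ := List.any_eq_true.mp h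
      have hr : (firstIdx p (ks :: rest)).map (· + n) = some n := by
        simp [firstIdx, h]
      rw [hr, List.min?_eq_some_iff]
      constructor
      · exact List.mem_append_left _ (List.mem_map.mpr ⟨k, List.mem_filter.mpr ⟨hk, hpk⟩, rfl⟩)
      · intro b hb
        rcases List.mem_append.mp hb with hb | hb
        · obtain ⟨-, -, rfl⟩ := List.mem_map.mp hb; exact le_rfl
        · exact Nat.le_of_succ_le (hitsOf_ge p rest (n + 1) b hb)
    · have hfil : (ks.filter p) = [] := by
        simp only [List.filter_eq_nil_iff]
        intro k hk
        by_contra hc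
        exact h (List.any_eq_true.mpr ⟨k, hk, by simpa using hc⟩)
      rw [hfil]
      simp only [List.map_nil, List.nil_append]
      rw [ih (n + 1)]
      simp only [firstIdx, h]
      cases firstIdx p rest <;> simp [Nat.add_assoc, Nat.add_comm 1 n]

lemma chainA_eq_firstIdx (p : String → Bool) :
    chainA p =
      match firstIdx p bloomGroups with
      | some r => bloomLevels.getD r "Understand (Comprehension)"
      | none => "Understand (Comprehension)" := by
  unfold chainA bloomGroups
  by_cases h0 : (["define", "identify", "list"]).any p = true
  · simp [firstIdx, h0, bloomLevels]
  · by_cases h1 : (["explain", "summarize", "describe", "interpret"]).any p = true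
    · simp [firstIdx, h0, h1, bloomLevels]
    · by_cases h2 : (["apply", "use", "calculate", "solve", "demonstrate"]).any p = true
      · simp [firstIdx, h0, h1, h2, bloomLevels]
      · by_cases h3 : (["compare", "contrast", "analyze", "impact", "effect", "examine"]).any p = true
        · simp [firstIdx, h0, h1, h2, h3, bloomLevels]
        · by_cases h4 : (["evaluate", "assess", "justify", "argue", "critique"]).any p = true
          · simp [firstIdx, h0, h1, h2, h3, h4, bloomLevels]
          · by_cases h5 : (["design", "create", "propose", "develop", "formulate"]).any p = true
            · simp [firstIdx, h0, h1, h2, h3, h4, h5, bloomLevels]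
            · simp [firstIdx, h0, h1, h2, h3, h4, h5]

-- ===== VERDICT (by name: the statement is the Claim_ definition above) =====
theorem bloom_level_spec : Claim_equal_bloom_level := by
  intro sent _
  unfold Spec_bloom_level
  rw [bloom_eq_chainA, chainA_eq_firstIdx]
  simp only [bloom_level_alt, bloomTable_eq]
  have h := min?_hits (fun k => PySem.Str.isIn k (PySem.Str.lower sent)) bloomGroups 0
  simp only [hitsOf] at h
  rw [h]
  cases firstIdx (fun k => PySem.Str.isIn k (PySem.Str.lower sent)) bloomGroups <;> simp
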